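-- pv_equiv track=rewrite | github.com/Shit-I-do-in-school/school_programming | programmering/12/12a.py | Cute4
-- ===== SOURCE A (Python) =====
-- def Cute4(text):
--     list = ["a", "b", "c", "d", "e", "f", "g", "h", "i", "j", "k", "l", "m", "n", "o", "p", " q", "r", "s", "t", "u", "v", "w", "x", "y", "å", "ä", "ö"]
--     list2 = ["A", "B", "C", "D", "E", "F", "G", "H", "I", "J", "K", "L" "M", "N", "O", "P", "Q", "R", "S", "T", "U", "V", "W", "X", "Y", "Å", "Ä", "Ö"]
--     count = 0
--     for i in text:
--         if i in list or i in list2: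
--             count += 1
--     return count
-- ===== SOURCE B (Python) =====
-- # Frequency-table reformulation: tally the text once, then sum the tallies of the
-- # matchable characters (exactly the single-char elements of A's lists: no 'q', no 'L'/'M').
-- _VALID = set("abcdefghijklmnoprstuvwxy\u00e5\u00e4\u00f6"
--              "ABCDEFGHIJKNOPQRSTUVWXY\u00c5\u00c4\u00d6")
--
--
-- def Cute4(text):
--     freq = {}
--     for ch in text:
--         freq[ch] = freq.get(ch, 0) + 1
--     return sum(freq.get(ch, 0) for ch in _VALID)
-- ===== Notes on version B (the rewrite author's own statement) =====
-- stated objective: alternative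
-- what changed: B builds a character-frequency dictionary of the text in one pass and then sums the tallies over the fixed set of matchable characters, instead of A's per-character membership scan over two string lists.
import Mathlib
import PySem

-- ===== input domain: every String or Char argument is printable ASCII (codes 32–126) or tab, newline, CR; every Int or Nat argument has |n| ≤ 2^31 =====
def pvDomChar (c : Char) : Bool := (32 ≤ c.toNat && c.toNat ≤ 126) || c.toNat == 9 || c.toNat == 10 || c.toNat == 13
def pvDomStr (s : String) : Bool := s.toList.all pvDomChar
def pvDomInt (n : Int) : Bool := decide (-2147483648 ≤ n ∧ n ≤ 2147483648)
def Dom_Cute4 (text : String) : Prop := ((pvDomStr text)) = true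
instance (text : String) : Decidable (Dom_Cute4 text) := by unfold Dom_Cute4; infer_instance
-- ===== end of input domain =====

-- B replaces A's per-character scan over two string lists by a one-pass frequency
-- dictionary summed over the set of matchable characters (alternative decomposition, same result).
-- Python string literals inside the ports are represented as their character lists
-- (List Char), which is exact for the equality tests the programs perform.


-- ===== PORT A =====
-- Python's `list` (note " q": two characters, so lowercase 'q' never matches)
def Cute4List1 : List (List Char) :=
  [['a'], ['b'], ['c'], ['d'], ['e'], ['f'], ['g'], ['h'], ['i'], ['j'], ['k'], ['l'],
   ['m'], ['n'], ['o'], ['p'], [' ', 'q'], ['r'], ['s'], ['t'], ['u'], ['v'], ['w'],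
   ['x'], ['y'], ['å'], ['ä'], ['ö']]

-- Python's `list2` (`"L" "M"` is source-level string concatenation: one element "LM")
def Cute4List2 : List (List Char) :=
  [['A'], ['B'], ['C'], ['D'], ['E'], ['F'], ['G'], ['H'], ['I'], ['J'], ['K'],
   ['L', 'M'], ['N'], ['O'], ['P'], ['Q'], ['R'], ['S'], ['T'], ['U'], ['V'], ['W'],
   ['X'], ['Y'], ['Å'], ['Ä'], ['Ö']]

def Cute4 (text : String) : Int :=
  text.toList.foldl
    (fun count i =>
      if Cute4List1.contains [i] || Cute4List2.contains [i] then count + 1 else count)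
    0

-- ===== PORT B =====
-- Source B's module constant _VALID = set("…"): the set of the distinct characters
def Cute4Valid : PySem.Set Char :=
  PySem.Set.ofList
    ['a', 'b', 'c', 'd', 'e', 'f', 'g', 'h', 'i', 'j', 'k', 'l', 'm', 'n', 'o', 'p',
     'r', 's', 't', 'u', 'v', 'w', 'x', 'y', 'å', 'ä', 'ö', 'A', 'B', 'C', 'D', 'E',
     'F', 'G', 'H', 'I', 'J', 'K', 'N', 'O', 'P', 'Q', 'R', 'S', 'T', 'U', 'V', 'W',
     'X', 'Y', 'Å', 'Ä', 'Ö']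

def Cute4_alt (text : String) : Int :=
  let freq : PySem.Dict Char Int :=
    text.toList.foldl (fun d ch => d.insert ch (d.getD ch 0 + 1)) PySem.Dict.empty
  Cute4Valid.foldl (fun acc ch => acc + freq.getD ch 0) 0

-- ===== PRECONDITION & SPEC =====
def Spec_Cute4 (text : String) (out : Int) : Prop := out = Cute4_alt text
instance (text : String) (out : Int) : Decidable (Spec_Cute4 text out) := by unfold Spec_Cute4; infer_instance

-- ===== CLAIM (what is proved, stated in full; the proofs are below) =====
def Claim_equal_Cute4 : Prop := ∀ (text : String), Dom_Cute4 text → Spec_Cute4 text (Cute4 text)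

-- ===== LEMMAS AND PROOFS =====

-- the distinct-character list the set literal evaluates to
def Cute4ValidList : List Char :=
  ['a', 'b', 'c', 'd', 'e', 'f', 'g', 'h', 'i', 'j', 'k', 'l', 'm', 'n', 'o', 'p',
   'r', 's', 't', 'u', 'v', 'w', 'x', 'y', 'å', 'ä', 'ö', 'A', 'B', 'C', 'D', 'E',
   'F', 'G', 'H', 'I', 'J', 'K', 'N', 'O', 'P', 'Q', 'R', 'S', 'T', 'U', 'V', 'W',
   'X', 'Y', 'Å', 'Ä', 'Ö']

set_option maxRecDepth 8192 in
theorem cute4_valid_eq : Cute4Valid = Cute4ValidList := by decide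

theorem cute4_valid_nodup : Cute4ValidList.Nodup := by decide

-- A's membership test over the two string lists is membership in B's valid set
theorem cute4_match_eq (c : Char) :
    (Cute4List1.contains [c] || Cute4List2.contains [c]) = decide (c ∈ Cute4ValidList) := by
  simp [Cute4List1, Cute4List2, Cute4ValidList]
  ac_rfl

theorem cute4_sum_counts (l : List Char) :
    (Cute4ValidList.map (fun ch => (l.count ch : Int))).sum
      = (l.countP (fun i => Cute4List1.contains [i] || Cute4List2.contains [i]) : Int) := by
  induction l with
  | nil => simp
  | cons c l ih =>
    have hcnt : (fun ch => (((c :: l).count ch : Nat) : Int))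
        = fun ch => (l.count ch : Int) + (if ch == c then (1 : Int) else 0) := by
      funext ch
      rw [List.count_cons]
      push_cast
      by_cases h : ch = c
      · subst h; simp
      · have h' : ¬(c = ch) := fun hh => h hh.symm
        simp [h, h']
    have hsplit :
        (Cute4ValidList.map (fun ch => (l.count ch : Int) + (if ch == c then (1 : Int) else 0))).sum
          = (Cute4ValidList.map (fun ch => (l.count ch : Int))).sum
            + (Cute4ValidList.map (fun ch => if ch == c then (1 : Int) else 0)).sum := by
      simpa using PySem.List.sum_map_add_int (l := Cute4ValidList)
        (f := fun ch => (l.count ch : Int)) (g := fun ch => if ch == c then (1 : Int) else 0)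
    have hite : (Cute4ValidList.map (fun ch => if ch == c then (1 : Int) else 0)).sum
        = if c ∈ Cute4ValidList then (1 : Int) else 0 := by
      rw [PySem.List.sum_map_ite_one_zero]
      by_cases hc : c ∈ Cute4ValidList
      · rw [show Cute4ValidList.countP (fun ch => ch == c) = Cute4ValidList.count c from rfl,
          List.count_eq_one_of_mem cute4_valid_nodup hc]
        simp [hc]
      · rw [show Cute4ValidList.countP (fun ch => ch == c) = Cute4ValidList.count c from rfl,
          List.count_eq_zero_of_not_mem hc]
        simp [hc]
    rw [hcnt, hsplit, ih, hite, List.countP_cons, cute4_match_eq c]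
    push_cast
    by_cases hc : c ∈ Cute4ValidList <;> simp [hc]

set_option maxRecDepth 8192 in
theorem Cute4_eq_alt (text : String) : Cute4 text = Cute4_alt text := by
  simp only [Cute4, Cute4_alt, PySem.Dict.foldl_insert_getD_add_one_eq_counter,
    PySem.List.foldl_add, cute4_valid_eq, PySem.Dict.getD_counter, zero_add]
  rw [cute4_sum_counts]
  simpa using PySem.List.foldl_count_if
    (fun i => Cute4List1.contains [i] || Cute4List2.contains [i]) text.toList 0

-- ===== VERDICT (by name: the statement is the Claim_ definition above) =====
theorem Cute4_spec : Claim_equal_Cute4 := by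
  intro text _
  exact Cute4_eq_alt text
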